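-- pv_equiv track=rewrite | github.com/nmp14/Codewars | 6_kyu/delete-nth.py | delete_nth
-- ===== SOURCE A (Python) =====
-- def delete_nth(order, max_e):
--     count_dict = {}
--     new_lst = []
--     for num in order:
--         if num not in count_dict.keys():
--             count_dict[num] = 1
--             if count_dict[num] <= max_e:
--                 new_lst.append(num)
--             else:
--                 continue
--         elif num in count_dict.keys():
--             count_dict[num] += 1
--             if count_dict[num] <= max_e:
--                 new_lst.append(num)
--             else:
--                 continue
--     return new_lst
-- ===== SOURCE B (Python) =====
-- def delete_nth(order, max_e):
--     # Group occurrences by value, keep the first max_e index slots of each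
--     # value, then reassemble the survivors in original order.
--     positions = {}
--     for i, num in enumerate(order):
--         positions.setdefault(num, []).append(i)
--     keep = set()
--     for idxs in positions.values():
--         keep.update(idxs[:max(max_e, 0)])
--     return [num for i, num in enumerate(order) if i in keep]
-- ===== Notes on version B (the rewrite author's own statement) =====
-- stated objective: alternative
-- what changed: Replaces A's single stateful pass (running count dictionary deciding each append) by a staged group-and-reassemble algorithm: group the indices of every value, keep only the first max_e index slots per value in a set, then rebuild the survivors from the original list by index.
import Mathlib
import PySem

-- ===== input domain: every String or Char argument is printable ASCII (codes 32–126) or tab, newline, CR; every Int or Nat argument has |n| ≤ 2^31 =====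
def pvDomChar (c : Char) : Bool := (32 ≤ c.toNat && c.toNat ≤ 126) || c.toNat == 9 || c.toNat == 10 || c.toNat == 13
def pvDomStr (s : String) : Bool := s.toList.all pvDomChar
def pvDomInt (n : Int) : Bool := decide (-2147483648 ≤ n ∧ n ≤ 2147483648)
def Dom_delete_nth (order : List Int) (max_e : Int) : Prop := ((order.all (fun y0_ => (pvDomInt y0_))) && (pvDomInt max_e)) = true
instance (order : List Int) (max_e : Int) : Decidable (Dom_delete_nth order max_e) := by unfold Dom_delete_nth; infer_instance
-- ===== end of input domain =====

-- B replaces A's single stateful pass (count dictionary + output accumulator) by a staged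
-- group-and-reassemble algorithm: group the indices of each value, keep only the first
-- max_e index slots per value, and rebuild the survivors in original order (alternative, not faster).

-- ===== PORT A =====
-- A: one pass; a count dictionary plus an output list (body of A's for-loop; the assignment
-- to count_dict[num] is inlined into the subsequent membership-updated lookup).
def dnStepA (max_e : Int) (st : PySem.Dict Int Int × List Int) (num : Int) :
    PySem.Dict Int Int × List Int :=
  if (st.1.get? num).isNone then
    if (st.1.insert num 1).getD num 0 ≤ max_e then
      (st.1.insert num 1, st.2 ++ [num])
    else
      (st.1.insert num 1, st.2)
  else
    if (st.1.insert num (st.1.getD num 0 + 1)).getD num 0 ≤ max_e then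
      (st.1.insert num (st.1.getD num 0 + 1), st.2 ++ [num])
    else
      (st.1.insert num (st.1.getD num 0 + 1), st.2)

def delete_nth (order : List Int) (max_e : Int) : List Int :=
  (order.foldl (dnStepA max_e) (PySem.Dict.empty, [])).2

-- ===== PORT B =====
-- B stage 1: positions[num] lists the indices at which num occurs
-- (positions.setdefault(num, []).append(i)  ==  d[num] = d.get(num, []) + [i], i.e. Dict.modify).
def dnPositions (order : List Int) : PySem.Dict Int (List Int) :=
  (PySem.List.enumerate order 0).foldl
    (fun d p => d.modify p.2 [] (· ++ [p.1])) PySem.Dict.empty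

-- B stage 2: keep = set of the first max_e indices of every value
-- (idxs[:max(max_e, 0)] has a nonnegative bound, so the slice is exactly List.take of its toNat).
def dnKeep (order : List Int) (max_e : Int) : PySem.Set Int :=
  ((dnPositions order).values).foldl
    (fun s idxs => PySem.Set.update s (idxs.take (max max_e 0).toNat)) PySem.Set.empty

-- B stage 3: the comprehension over enumerate(order) filtering on i in keep.
def delete_nth_alt (order : List Int) (max_e : Int) : List Int :=
  ((PySem.List.enumerate order 0).filter
      (fun p => PySem.Set.contains (dnKeep order max_e) p.1)).map (·.2)

-- ===== PRECONDITION & SPEC =====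
def Spec_delete_nth (order : List Int) (max_e : Int) (out : List Int) : Prop := out = delete_nth_alt order max_e
instance (order : List Int) (max_e : Int) (out : List Int) : Decidable (Spec_delete_nth order max_e out) := by unfold Spec_delete_nth; infer_instance

-- ===== CLAIM (what is proved, stated in full; the proofs are below) =====
def Claim_equal_delete_nth : Prop := ∀ (order : List Int) (max_e : Int), Dom_delete_nth order max_e → Spec_delete_nth order max_e (delete_nth order max_e)

-- ===== LEMMAS AND PROOFS =====

-- Canonical middle ground: keep the pair (i, x) of enumerate(order) iff x occurs
-- fewer than max_e times before position i.
def dnCond (order : List Int) (max_e : Int) (p : Int × Int) : Bool :=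
  decide (((order.take p.1.toNat).count p.2 : Int) < max_e)

def dnG (order : List Int) (max_e : Int) : List Int :=
  ((PySem.List.enumerate order 0).filter (dnCond order max_e)).map (·.2)

-- ---- A = dnG ----

-- The dictionary in A's fold counts occurrences of each value processed so far.
lemma dnA_dict (max_e : Int) :
    ∀ (l : List Int) (d : PySem.Dict Int Int) (res : List Int) (k : Int),
      ((l.foldl (dnStepA max_e) (d, res)).1).getD k 0 = d.getD k 0 + l.count k := by
  intro l
  induction l with
  | nil => intro d res k; simp
  | cons x t ih =>
    intro d res k
    have hstep : (dnStepA max_e (d, res) x).1 = d.insert x (d.getD x 0 + 1) := by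
      by_cases h : (d.get? x).isNone
      · have h0 : d.getD x 0 = 0 := by
          simp [PySem.Dict.getD_eq_get?_getD, Option.isNone_iff_eq_none.mp h]
        unfold dnStepA
        rw [if_pos h]
        split_ifs <;> simp [h0]
      · unfold dnStepA
        rw [if_neg h]
        split_ifs <;> rfl
    rw [List.foldl_cons]
    have := ih (dnStepA max_e (d, res) x).1 (dnStepA max_e (d, res) x).2 k
    rw [Prod.mk.eta] at this
    rw [this, hstep, PySem.Dict.getD_insert]
    by_cases hk : k = x <;> simp [hk, List.count_cons] <;> omega

lemma dnG_append (l : List Int) (max_e : Int) (x : Int) :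
    dnG (l ++ [x]) max_e
      = dnG l max_e ++ (if ((l.count x : Int)) < max_e then [x] else []) := by
  unfold dnG
  rw [PySem.List.enumerate_append, List.filter_append, List.map_append]
  congr 1
  · congr 1
    apply List.filter_congr
    intro p hp
    rcases (PySem.List.mem_enumerate_iff _ _ _).mp hp with ⟨k, hk, rfl⟩
    simp only [dnCond, zero_add, Int.toNat_natCast]
    rw [List.take_append_of_le_length (le_of_lt hk)]
  · rw [PySem.List.enumerate_cons, PySem.List.enumerate_nil]
    simp only [zero_add]
    have hc : dnCond (l ++ [x]) max_e ((l.length : Int), x)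
        = decide ((l.count x : Int) < max_e) := by
      simp only [dnCond, Int.toNat_natCast, List.take_left]
    by_cases h : ((l.count x : Int)) < max_e
    · simp [hc, h]
    · simp [hc, h]

lemma dnA_eq_G (max_e : Int) (order : List Int) :
    delete_nth order max_e = dnG order max_e := by
  induction order using List.reverseRecOn with
  | nil => rfl
  | append_singleton l x ih =>
    unfold delete_nth
    rw [List.foldl_append, List.foldl_cons, List.foldl_nil]
    have hd : ((l.foldl (dnStepA max_e) (PySem.Dict.empty, [])).1).getD x 0
        = (l.count x : Int) := by
      rw [dnA_dict]; simp
    have hres : (l.foldl (dnStepA max_e) (PySem.Dict.empty, [])).2 = dnG l max_e := ih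
    rw [dnG_append l max_e x, ← hres]
    set st := l.foldl (dnStepA max_e) (PySem.Dict.empty, []) with hst
    by_cases h : (st.1.get? x).isNone
    · have h0 : st.1.getD x 0 = 0 := by
        simp [PySem.Dict.getD_eq_get?_getD, Option.isNone_iff_eq_none.mp h]
      have hc0 : (l.count x : Int) = 0 := by rw [← hd, h0]
      unfold dnStepA
      rw [if_pos h]
      simp only [PySem.Dict.getD_insert_self]
      by_cases hle : (1 : Int) ≤ max_e
      · rw [if_pos hle, if_pos (by omega)]
      · rw [if_neg hle, if_neg (by omega)]; simp
    · unfold dnStepA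
      rw [if_neg h]
      simp only [PySem.Dict.getD_insert_self]
      by_cases hle : st.1.getD x 0 + 1 ≤ max_e
      · rw [if_pos hle, if_pos (by rw [← hd]; omega)]
      · rw [if_neg hle, if_neg (by rw [← hd]; omega)]; simp

-- ---- B = dnG ----

-- positions[v] is the list of indices at which v occurs, in order.
lemma dnPositions_getD (order : List Int) (v : Int) :
    (dnPositions order).getD v []
      = ((PySem.List.enumerate order 0).filter (fun p => p.2 == v)).map (·.1) := by
  unfold dnPositions
  have hswap : (PySem.List.enumerate order 0).foldl
        (fun d p => d.modify p.2 [] (· ++ [p.1])) PySem.Dict.empty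
      = ((PySem.List.enumerate order 0).map (fun p => (p.2, p.1))).foldl
        (fun d q => d.modify q.1 [] (· ++ [q.2])) PySem.Dict.empty := by
    rw [List.foldl_map]
  rw [hswap, PySem.Dict.getD_foldl_modify_append]
  simp [List.filter_map, Function.comp_def]

lemma dnPositions_keys (order : List Int) :
    (dnPositions order).keys = PySem.Set.ofList order := by
  unfold dnPositions
  rw [PySem.Dict.keys_foldl_modify_key (key := fun p : Int × Int => p.2)]
  simp [PySem.List.map_snd_enumerate, PySem.Set.update_nil_left]

lemma dnPositions_keys_nodup (order : List Int) : (dnPositions order).keys.Nodup := by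
  rw [dnPositions_keys]; exact PySem.Set.nodup_ofList order

-- membership in a fold of Set.update over truncated lists
lemma dn_mem_foldl_update (m : Nat) (L : List (List Int)) :
    ∀ (s : PySem.Set Int) (y : Int),
      y ∈ L.foldl (fun s idxs => PySem.Set.update s (idxs.take m)) s
        ↔ y ∈ s ∨ ∃ idxs ∈ L, y ∈ idxs.take m := by
  induction L with
  | nil => intro s y; simp
  | cons a t ih =>
    intro s y
    rw [List.foldl_cons, ih, PySem.Set.mem_update]
    constructor
    · rintro (⟨h | h⟩ | ⟨idxs, hmem, hy⟩)
      · exact Or.inl h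
      · exact Or.inr ⟨a, by simp, h⟩
      · exact Or.inr ⟨idxs, by simp [hmem], hy⟩
    · rintro (h | ⟨idxs, hmem, hy⟩)
      · exact Or.inl (Or.inl h)
      · rcases List.mem_cons.mp hmem with rfl | hm
        · exact Or.inl (Or.inr hy)
        · exact Or.inr ⟨idxs, hm, hy⟩

lemma dnKeep_mem (order : List Int) (max_e : Int) (y : Int) :
    y ∈ dnKeep order max_e
      ↔ ∃ v ∈ order, y ∈ ((dnPositions order).getD v []).take (max max_e 0).toNat := by
  unfold dnKeep
  rw [dn_mem_foldl_update]
  have hv : (dnPositions order).values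
      = (dnPositions order).keys.map (fun k => (dnPositions order).getD k []) :=
    PySem.Dict.values_eq_map_keys _ (dnPositions_keys_nodup order) []
  constructor
  · rintro (h | ⟨idxs, hmem, hy⟩)
    · simp [PySem.Set.empty] at h
    · rw [hv, List.mem_map] at hmem
      rcases hmem with ⟨k, hk, rfl⟩
      refine ⟨k, ?_, hy⟩
      rw [dnPositions_keys] at hk
      exact (PySem.Set.mem_ofList _ _).mp hk
  · rintro ⟨v, hvmem, hy⟩
    refine Or.inr ⟨(dnPositions order).getD v [], ?_, hy⟩
    rw [hv]
    exact List.mem_map_of_mem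
      (by rw [dnPositions_keys]; exact (PySem.Set.mem_ofList _ _).mpr hvmem)

-- the length of the by-value filter of an enumeration is the plain count
lemma dn_filter_enum_len (v : Int) :
    ∀ (l : List Int) (s : Int),
      ((PySem.List.enumerate l s).filter (fun p => p.2 == v)).length = l.count v := by
  intro l
  induction l with
  | nil => intro s; simp [PySem.List.enumerate_nil]
  | cons x t ih =>
    intro s
    rw [PySem.List.enumerate_cons]
    by_cases hx : x = v
    · simp [hx, ih (s + 1)]
    · simp [hx, ih (s + 1), Ne.symm]

-- an index appearing among a value's occurrence slots determines its value
lemma dn_mem_posList (order : List Int) (v y : Int)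
    (h : y ∈ ((PySem.List.enumerate order 0).filter (fun p => p.2 == v)).map (·.1)) :
    ∃ (k : Nat) (hk : k < order.length), y = (k : Int) ∧ order[k] = v := by
  rcases List.mem_map.mp h with ⟨p, hp, rfl⟩
  have hpv : p.2 = v := by
    have := (List.mem_filter.mp hp).2
    simpa using this
  rcases (PySem.List.mem_enumerate_iff _ _ _).mp (List.mem_filter.mp hp).1 with ⟨k, hk, hpk⟩
  exact ⟨k, hk, by rw [hpk]; simp, by rw [hpk] at hpv; simpa using hpv⟩

-- THE rank fact: index k is among the first m occurrence slots of order[k]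
-- iff order[k] occurs fewer than m times before k.
lemma dn_take_posList (order : List Int) (k : Nat) (hk : k < order.length) (m : Nat) :
    ((k : Int) ∈ (((PySem.List.enumerate order 0).filter (fun p => p.2 == order[k])).map (·.1)).take m)
      ↔ (order.take k).count order[k] < m := by
  set x := order[k] with hx
  have hsplit : order = order.take k ++ order.drop k := (List.take_append_drop k order).symm
  have hdrop : order.drop k = x :: order.drop (k + 1) := by
    rw [hx]; exact (List.drop_eq_getElem_cons hk)
  have hlen : (order.take k).length = k := by simp [List.length_take]; omega
  conv_lhs => rw [hsplit, hdrop]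
  rw [PySem.List.enumerate_append, PySem.List.enumerate_cons, List.filter_append,
      List.map_append, List.take_append, List.mem_append]
  have hA : ∀ y ∈ ((PySem.List.enumerate (order.take k) 0).filter (fun p => p.2 == x)).map (·.1),
      y < (k : Int) := by
    intro y hy
    rcases dn_mem_posList _ _ _ hy with ⟨j, hj, rfl, _⟩
    rw [hlen] at hj
    exact_mod_cast hj
  have hlenA : (((PySem.List.enumerate (order.take k) 0).filter (fun p => p.2 == x)).map (·.1)).length
      = (order.take k).count x := by
    rw [List.length_map, dn_filter_enum_len]
  have hknA : (k : Int) ∉ (((PySem.List.enumerate (order.take k) 0).filter (fun p => p.2 == x)).map (·.1)).take m := by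
    intro hmem
    have := hA _ (List.mem_of_mem_take hmem)
    omega
  have hheadfilter :
      ((((0 : Int) + (order.take k).length, x) ::
          PySem.List.enumerate (order.drop (k + 1)) (0 + (order.take k).length + 1)).filter
            (fun p => p.2 == x))
        = ((0 : Int) + (order.take k).length, x) ::
            ((PySem.List.enumerate (order.drop (k + 1)) (0 + (order.take k).length + 1)).filter
              (fun p => p.2 == x)) := by
    rw [List.filter_cons]
    simp
  constructor
  · rintro (h | h)
    · exact absurd h hknA
    · by_contra hc
      rw [Nat.not_lt] at hc
      have hz : m - (((PySem.List.enumerate (order.take k) 0).filter (fun p => p.2 == x)).map (·.1)).length = 0 := by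
        omega
      rw [hz, List.take_zero] at h
      simp at h
  · intro h
    right
    rw [hheadfilter, List.map_cons]
    have hpos : 0 < m - (((PySem.List.enumerate (order.take k) 0).filter (fun p => p.2 == x)).map (·.1)).length := by
      omega
    rcases Nat.exists_eq_add_of_lt hpos with ⟨c, hcz⟩
    rw [hcz]
    rw [List.take_succ_cons]
    exact List.mem_cons.mpr (Or.inl (by simp [hlen]))

lemma dnB_eq_G (order : List Int) (max_e : Int) :
    delete_nth_alt order max_e = dnG order max_e := by
  unfold delete_nth_alt dnG
  congr 1
  apply List.filter_congr
  intro p hp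
  rcases (PySem.List.mem_enumerate_iff _ _ _).mp hp with ⟨k, hk, rfl⟩
  simp only [zero_add]
  have hm : ∀ c : Nat, (c < (max max_e 0).toNat ↔ ((c : Int) < max_e)) := by
    intro c; omega
  have hcond : dnCond order max_e ((k : Int), order[k])
      = decide ((order.take k).count order[k] < (max max_e 0).toNat) := by
    simp only [dnCond, Int.toNat_natCast]
    by_cases h : ((order.take k).count order[k] : Int) < max_e
    · simp [h, (hm _).mpr h]
    · simp [h]
  rw [hcond]
  by_cases h : (k : Int) ∈ dnKeep order max_e
  · rcases (dnKeep_mem order max_e (k : Int)).mp h with ⟨v, hv, hmem⟩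
    rw [dnPositions_getD] at hmem
    have hvx : v = order[k] := by
      rcases dn_mem_posList order v (k : Int) (List.mem_of_mem_take hmem) with ⟨j, hj, hjk, hjv⟩
      have hjk' : j = k := by exact_mod_cast hjk.symm
      subst hjk'; exact hjv.symm
    subst hvx
    have hcount := (dn_take_posList order k hk _).mp hmem
    simp [pysem, h, hcount]
  · have hnot : ¬ (order.take k).count order[k] < (max max_e 0).toNat := by
      intro hc
      apply h
      rw [dnKeep_mem]
      exact ⟨order[k], List.getElem_mem hk, by
        rw [dnPositions_getD]; exact (dn_take_posList order k hk _).mpr hc⟩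
    simp [pysem, h, hnot]

-- ===== VERDICT (by name: the statement is the Claim_ definition above) =====
theorem delete_nth_spec : Claim_equal_delete_nth := by
  intro order max_e _
  unfold Spec_delete_nth
  rw [dnA_eq_G, dnB_eq_G]
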